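-- pv_equiv track=rewrite | github.com/chestnut-j/dataGen | dataTool/app.py | findConstrain
-- ===== SOURCE A (Python) =====
-- def findPosi(allStr, findStr):
--   #用于存储findStr标识符的出现
--   posiList = []
--   #是否有findStr的标识符
--   findPosi = False
--   findOption = False
--   #先确定是否存在findStr标识符并获取其位置
--   if allStr.find(findStr) != -1:
--       posiList.append(allStr.find(findStr))
--       #已找到当前的posiStr位置，可以继续寻找下一个
--       findOption = True
--       #下一个标识符开始寻找的位置
--       findPosi = allStr.find(findStr) + 1
--   #寻找约束中剩余的findStr标识符
--   while(findOption):
--       if allStr.find(findStr, findPosi) != -1: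
--           posiList.append(allStr.find(findStr, findPosi))
--           findPosi = allStr.find(findStr, findPosi) + 1
--       else:
--           findOption = False
--
--   return posiList
--
-- def isOuterrontParenthesis(constraint):
--   if constraint[0] == '(' and constraint[len(constraint)-1] == ')':
--     constraint = constraint[1:len(constraint)-1]
--     #用于存储前括号的位置信息
--     frontParenthesisList = findPosi(constraint, '(')
--     #用于存储后括号的位置信息
--     backParenthesisList = findPosi(constraint, ')')
--     for position in range(0, len(backParenthesisList)):
--       if frontParenthesisList[position] > backParenthesisList[position]:
--         return False
--     return True
--   else:
--     return False
--
-- def findConstrain(allStr, operation):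
--     # constraint = allStr.replace(" ","")
--     constraint = allStr
--     if isOuterrontParenthesis(constraint):
--         constraint = constraint[1:len(constraint)-1]
--     opList = findPosi(constraint, operation)
--     opLen = len(operation)
--     constraintList = []
--     for i in range(0, len(opList)):
--         if i == 0 and len(opList) == 1:
--             constraintList.append(constraint[0:opList[i]])
--             constraintList.append(constraint[opList[i] + opLen:])
--         elif i == 0 and len(opList) != 1:
--             constraintList.append(constraint[0:opList[i]])
--         elif i == len(opList) - 1:
--             constraintList.append(constraint[opList[i-1] + opLen: opList[i]])
--             constraintList.append(constraint[opList[i] + opLen:])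
--         else:
--             constraintList.append(constraint[opList[i-1] + opLen: opList[i]])
--     return constraintList
-- ===== SOURCE B (Python) =====
-- def _isStrippable(c):
--     # outer-paren check by a single balance-counter sweep (no position lists):
--     # equivalent to A's pairwise front/back position comparison wherever A returns
--     if not (c[:1] == '(' and c[-1:] == ')'):
--         return False
--     bal = 0
--     for ch in c[1:-1]:
--         if ch == '(':
--             bal += 1
--         elif ch == ')':
--             bal -= 1
--             if bal < 0:
--                 return False
--     return True
--
-- def _segments(c, op, segStart, searchFrom):
--     # recursive split: emit the segment before the next match, recurse past it
--     p = c.find(op, searchFrom)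
--     if p == -1:
--         return [c[segStart:]]
--     return [c[segStart:p]] + _segments(c, op, p + len(op), p + 1)
--
-- def findConstrain(allStr, operation):
--     constraint = allStr
--     if _isStrippable(constraint):
--         constraint = constraint[1:-1]
--     if constraint.find(operation) == -1:
--         return []
--     return _segments(constraint, operation, 0, 0)
-- ===== Notes on version B (the rewrite author's own statement) =====
-- stated objective: simpler
-- what changed: B drops A's position-list machinery entirely: the outer-paren test becomes a single balance-counter sweep over the characters (instead of building two parenthesis-position lists with repeated str.find and comparing them pairwise), and the split is produced by direct recursion that emits each segment as it passes the next match (instead of materialising the full opList and replaying it with four indexed special-case branches).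
import Mathlib
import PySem

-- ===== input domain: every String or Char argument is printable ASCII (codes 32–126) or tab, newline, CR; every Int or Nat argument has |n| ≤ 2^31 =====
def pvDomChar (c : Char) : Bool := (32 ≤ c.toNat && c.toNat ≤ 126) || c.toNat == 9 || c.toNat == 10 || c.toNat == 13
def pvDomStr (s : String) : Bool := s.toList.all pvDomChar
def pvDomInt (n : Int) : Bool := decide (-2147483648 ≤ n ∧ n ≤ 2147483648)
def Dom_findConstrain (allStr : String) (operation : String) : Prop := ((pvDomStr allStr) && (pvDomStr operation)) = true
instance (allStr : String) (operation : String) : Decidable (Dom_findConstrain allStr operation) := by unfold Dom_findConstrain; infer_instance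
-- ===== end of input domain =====

-- B replaces A's position-list machinery (three findPosi scans + a four-branch indexed segment loop) by a
-- balance-counter sweep for the outer-paren test and a direct recursive splitter; equal to A wherever A
-- returns (Pre_ excludes exactly A's IndexError inputs).

-- ===== PORT A =====
-- A's helpers work on List Char (string slicing/indexing via PySem on toList, exact); results rebuilt with String.ofList.

-- termination facts for the while-loop of findPosi (cited by findPosiLoopA's and segsB's decreasing_by)
theorem pvFindFrom_of_gt (s f : List Char) (k : Nat) (h : s.length < k) :
    PySem.Chars.findFrom s f (k : Int) none = -1 := by
  have h1 : ¬((k : Int) < 0) := by omega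
  have h2 : ((s.length : Int)) < (k : Int) := by exact_mod_cast h
  simp [PySem.Chars.findFrom, h1, h2]

theorem pvFindFrom_ret_bounds (s f : List Char) (p : Nat)
    (h : PySem.Chars.findFrom s f (p : Int) none ≠ -1) :
    p ≤ (PySem.Chars.findFrom s f (p : Int) none).toNat ∧
      (PySem.Chars.findFrom s f (p : Int) none).toNat ≤ s.length := by
  by_cases hp : p ≤ s.length
  · obtain ⟨h1, h2, h3⟩ := PySem.Chars.findFrom_natCast_spec s f p hp h
    set r := PySem.Chars.findFrom s f (p : Int) none with hr
    have hr0 : (0 : Int) ≤ r := le_trans (Int.natCast_nonneg p) h1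
    have hpr : p ≤ r.toNat := by omega
    refine ⟨hpr, ?_⟩
    by_cases hlen : r.toNat ≤ s.length
    · exact hlen
    · exfalso
      have hdrop : List.drop r.toNat s = [] := List.drop_eq_nil_of_le (by omega)
      rw [hdrop] at h2
      have hf : f = [] := List.prefix_nil.mp h2
      have := h3 p le_rfl (by omega)
      rw [hf] at this
      exact this List.nil_prefix
  · exact absurd (pvFindFrom_of_gt s f p (by omega)) h

-- the while(findOption) loop of A's findPosi: keep finding the next occurrence from position p
def findPosiLoopA (s f : List Char) (p : Nat) (acc : List Int) : List Int :=
  let r := PySem.Chars.findFrom s f (p : Int) none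
  if h : r ≠ -1 then findPosiLoopA s f (r.toNat + 1) (acc ++ [r]) else acc
termination_by s.length + 1 - p
decreasing_by
  have hb := pvFindFrom_ret_bounds s f p h
  omega

def findPosiA (s f : List Char) : List Int :=
  let first := PySem.Chars.find s f
  if first ≠ -1 then findPosiLoopA s f (first.toNat + 1) [first] else []

def isOuterA (c : List Char) : Bool :=
  -- c[0] / c[len-1]: Python raises IndexError on the empty string (excluded by Pre_); the default ' ' is never the answer there
  if (PySem.List.pyGetD c 0 ' ' == '(') && (PySem.List.pyGetD c ((c.length : Int) - 1) ' ' == ')') then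
    let inner := PySem.List.slice c (some 1) (some ((c.length : Int) - 1))
    let fp := findPosiA inner ['(']
    let bp := findPosiA inner [')']
    -- frontParenthesisList[position] raises IndexError when fp is exhausted (excluded by Pre_); default 0 there
    (List.range bp.length).all (fun pos =>
      ! decide (PySem.List.pyGetD fp (pos : Int) 0 > PySem.List.pyGetD bp (pos : Int) 0))
  else false

def findConstrain (allStr : String) (operation : String) : List String :=
  let c0 := allStr.toList
  let c := if isOuterA c0 then PySem.List.slice c0 (some 1) (some ((c0.length : Int) - 1)) else c0
  let opList := findPosiA c operation.toList
  let opLen : Int := operation.toList.length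
  let k := opList.length
  let segs := (List.range k).foldl (fun acc i =>
    if i = 0 ∧ k = 1 then
      acc ++ [PySem.List.slice c (some 0) (some (opList.getD i 0))]
          ++ [PySem.List.slice c (some (opList.getD i 0 + opLen)) none]
    else if i = 0 then
      acc ++ [PySem.List.slice c (some 0) (some (opList.getD i 0))]
    else if i = k - 1 then
      acc ++ [PySem.List.slice c (some (opList.getD (i - 1) 0 + opLen)) (some (opList.getD i 0))]
          ++ [PySem.List.slice c (some (opList.getD i 0 + opLen)) none]
    else
      acc ++ [PySem.List.slice c (some (opList.getD (i - 1) 0 + opLen)) (some (opList.getD i 0))]) []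
  segs.map String.ofList

-- ===== PORT B =====
-- Source B's balance-counter sweep over the inner characters ('for ch in c[1:-1]: …', early False when bal < 0)
def balB (bal : Int) : List Char → Bool
  | [] => true
  | ch :: rest =>
      if ch = '(' then balB (bal + 1) rest
      else if ch = ')' then (if bal - 1 < 0 then false else balB (bal - 1) rest)
      else balB bal rest

def isOuterB (c : List Char) : Bool :=
  -- Source B: if not (c[:1] == '(' and c[-1:] == ')'): return False, then the counter sweep
  if (PySem.List.slice c none (some 1) == ['(']) && (PySem.List.slice c (some (-1)) none == [')']) then
    balB 0 (PySem.List.slice c (some 1) (some (-1)))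
  else false

-- Source B's _segments: emit the segment before the next match, recurse past it
def segsB (c f : List Char) (segStart : Int) (searchFrom : Nat) : List (List Char) :=
  let r := PySem.Chars.findFrom c f (searchFrom : Int) none
  if h : r ≠ -1 then
    PySem.List.slice c (some segStart) (some r) :: segsB c f (r + (f.length : Int)) (r.toNat + 1)
  else [PySem.List.slice c (some segStart) none]
termination_by c.length + 1 - searchFrom
decreasing_by
  have hb := pvFindFrom_ret_bounds c f searchFrom h
  omega

def findConstrain_alt (allStr : String) (operation : String) : List String :=
  let c0 := allStr.toList
  let c := if isOuterB c0 then PySem.List.slice c0 (some 1) (some (-1)) else c0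
  if PySem.Chars.find c operation.toList = -1 then []
  else (segsB c operation.toList 0 0).map String.ofList

-- ===== PRECONDITION & SPEC =====
-- positions of the character ch in s, in increasing order (used only to state Pre_)
def pvParenPos (ch : Char) (s : List Char) : List Nat :=
  (List.range s.length).filter (fun i => s.getD i ' ' == ch)

-- Pre_ excludes exactly the inputs on which the Python A raises IndexError: the empty string, and strings whose outer
-- parens get stripped while the inner part has more ')' than '(' positions and every paired '(' position ≤ its ')' position.
def Pre_findConstrain (allStr : String) (operation : String) : Prop :=
  allStr.toList ≠ [] ∧
  ¬ (allStr.toList.head? = some '(' ∧ allStr.toList.getLast? = some ')' ∧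
     (pvParenPos '(' allStr.toList.tail.dropLast).length < (pvParenPos ')' allStr.toList.tail.dropLast).length ∧
     ∀ q < (pvParenPos '(' allStr.toList.tail.dropLast).length,
       (pvParenPos '(' allStr.toList.tail.dropLast).getD q 0 ≤ (pvParenPos ')' allStr.toList.tail.dropLast).getD q 0)
instance (allStr : String) (operation : String) : Decidable (Pre_findConstrain allStr operation) := by
  unfold Pre_findConstrain; infer_instance

def pvWitness_findConstrain : String × String := ("(a+b)", "+")

def Spec_findConstrain (allStr : String) (operation : String) (out : List String) : Prop :=
  out = findConstrain_alt allStr operation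
instance (allStr : String) (operation : String) (out : List String) : Decidable (Spec_findConstrain allStr operation out) := by
  unfold Spec_findConstrain; infer_instance

-- ===== CLAIM (what is proved, stated in full; the proofs are below) =====
def Claim_equal_findConstrain : Prop := ∀ (allStr : String) (operation : String), Dom_findConstrain allStr operation → Pre_findConstrain allStr operation → Spec_findConstrain allStr operation (findConstrain allStr operation)

-- ===== LEMMAS AND PROOFS =====

-- proof-side description of the overlapping-occurrence position list
def pvOcc (s f : List Char) : List Int :=
  ((List.range (s.length + 1)).filter (fun i => PySem.Chars.startswith (List.drop i s) f)).map Int.ofNat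

theorem pvFilter_empty (s f : List Char) (p : Nat)
    (hc : PySem.Chars.findFrom s f (p : Int) none = -1) :
    (List.range' p (s.length + 1 - p)).filter
      (fun i => PySem.Chars.startswith (List.drop i s) f) = [] := by
  by_cases hp : p ≤ s.length
  · have hno : ¬ f <:+: List.drop p s := (PySem.Chars.findFrom_natCast_eq_neg_one_iff s f p hp).mp hc
    rw [List.filter_eq_nil_iff]
    intro i hi hq
    apply hno
    have hip : p ≤ i := (List.mem_range'_1.mp hi).1
    have hpre : f <+: List.drop i s := (PySem.Chars.startswith_iff _ _).mp hq
    have hd : List.drop i s = List.drop (i - p) (List.drop p s) := by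
      rw [List.drop_drop]; congr 1; omega
    rw [hd] at hpre
    exact hpre.isInfix.trans (List.drop_suffix (i - p) (List.drop p s)).isInfix
  · have h0 : s.length + 1 - p = 0 := by omega
    rw [h0]
    simp [List.range']

theorem pvFilter_step (s f : List Char) (p : Nat)
    (hc : PySem.Chars.findFrom s f (p : Int) none ≠ -1) :
    (List.range' p (s.length + 1 - p)).filter
        (fun i => PySem.Chars.startswith (List.drop i s) f) =
      (PySem.Chars.findFrom s f (p : Int) none).toNat ::
        (List.range' ((PySem.Chars.findFrom s f (p : Int) none).toNat + 1)
            (s.length + 1 - ((PySem.Chars.findFrom s f (p : Int) none).toNat + 1))).filter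
          (fun i => PySem.Chars.startswith (List.drop i s) f) := by
  obtain ⟨hpr, hrle⟩ := pvFindFrom_ret_bounds s f p hc
  have hp : p ≤ s.length := le_trans hpr hrle
  obtain ⟨h1, h2, h3⟩ := PySem.Chars.findFrom_natCast_spec s f p hp hc
  set r := PySem.Chars.findFrom s f (p : Int) none with hrdef
  have hsplit : List.range' p (s.length + 1 - p) =
      List.range' p (r.toNat - p) ++ List.range' r.toNat (s.length + 1 - r.toNat) := by
    have e : s.length + 1 - p = (r.toNat - p) + (s.length + 1 - r.toNat) := by omega
    rw [e, ← List.range'_append]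
    have e2 : p + 1 * (r.toNat - p) = r.toNat := by omega
    rw [e2]
  rw [hsplit, List.filter_append]
  have hfirst : (List.range' p (r.toNat - p)).filter
      (fun i => PySem.Chars.startswith (List.drop i s) f) = [] := by
    rw [List.filter_eq_nil_iff]
    intro i hi hq
    obtain ⟨hpi, hir⟩ := List.mem_range'_1.mp hi
    exact h3 i hpi (by omega) ((PySem.Chars.startswith_iff _ _).mp hq)
  rw [hfirst, List.nil_append]
  have hr1 : s.length + 1 - r.toNat = (s.length - r.toNat) + 1 := by omega
  have e3 : s.length + 1 - (r.toNat + 1) = s.length - r.toNat := by omega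
  rw [hr1, e3, List.range'_succ, List.filter_cons]
  have hq : PySem.Chars.startswith (List.drop r.toNat s) f = true :=
    (PySem.Chars.startswith_iff _ _).mpr h2
  simp [hq]

theorem pvLoopA_eq (s f : List Char) (p : Nat) (acc : List Int) :
    findPosiLoopA s f p acc =
      acc ++ ((List.range' p (s.length + 1 - p)).filter
        (fun i => PySem.Chars.startswith (List.drop i s) f)).map Int.ofNat := by
  have key : ∀ m : Nat, ∀ p acc, s.length + 1 - p ≤ m →
      findPosiLoopA s f p acc =
        acc ++ ((List.range' p (s.length + 1 - p)).filter
          (fun i => PySem.Chars.startswith (List.drop i s) f)).map Int.ofNat := by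
    intro m
    induction m with
    | zero =>
      intro p acc hm
      have hp : s.length < p := by omega
      rw [findPosiLoopA]
      rw [dif_neg (by simp [pvFindFrom_of_gt s f p hp])]
      have h0 : s.length + 1 - p = 0 := by omega
      rw [h0]
      simp [List.range']
    | succ m ih =>
      intro p acc hm
      rw [findPosiLoopA]
      by_cases hc : PySem.Chars.findFrom s f (p : Int) none = -1
      · rw [dif_neg (by simpa using hc)]
        rw [pvFilter_empty s f p hc]
        simp
      · rw [dif_pos (by simpa using hc)]
        obtain ⟨hpr, hrle⟩ := pvFindFrom_ret_bounds s f p hc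
        have hrec : s.length + 1 - ((PySem.Chars.findFrom s f (p : Int) none).toNat + 1) ≤ m := by
          omega
        rw [ih _ _ hrec]
        rw [pvFilter_step s f p hc, List.map_cons]
        have hp : p ≤ s.length := le_trans hpr hrle
        have hr0 : (0 : Int) ≤ PySem.Chars.findFrom s f (p : Int) none :=
          le_trans (Int.natCast_nonneg p) (PySem.Chars.findFrom_natCast_spec s f p hp hc).1
        have hrval : Int.ofNat (PySem.Chars.findFrom s f (p : Int) none).toNat =
            PySem.Chars.findFrom s f (p : Int) none := Int.toNat_of_nonneg hr0
        rw [hrval]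
        simp
  exact key (s.length + 1 - p) p acc le_rfl

theorem pvFindPosi_eq (s f : List Char) : findPosiA s f = pvOcc s f := by
  have hz : ((0 : Nat) : Int) = (0 : Int) := by norm_num
  have h0 : PySem.Chars.find s f = PySem.Chars.findFrom s f ((0 : Nat) : Int) none := by
    rw [hz, PySem.Chars.findFrom_zero]
  unfold findPosiA pvOcc
  rw [List.range_eq_range']
  by_cases hc : PySem.Chars.find s f = -1
  · rw [if_neg (by simpa using hc)]
    rw [h0] at hc
    have he := pvFilter_empty s f 0 hc
    simp only [Nat.sub_zero] at he
    rw [he]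
    simp
  · rw [if_pos (by simpa using hc)]
    rw [h0] at hc
    have hstep := pvFilter_step s f 0 hc
    simp only [Nat.sub_zero] at hstep
    rw [hstep, List.map_cons]
    rw [pvLoopA_eq]
    have hr0 : (0 : Int) ≤ PySem.Chars.findFrom s f ((0 : Nat) : Int) none := by
      have := (PySem.Chars.findFrom_natCast_spec s f 0 (by omega) hc).1
      omega
    have hrval : Int.ofNat (PySem.Chars.findFrom s f ((0 : Nat) : Int) none).toNat =
        PySem.Chars.findFrom s f ((0 : Nat) : Int) none := Int.toNat_of_nonneg hr0
    rw [hrval, h0]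
    simp

theorem pvOcc_single (ch : Char) (s : List Char) :
    pvOcc s [ch] = (pvParenPos ch s).map Int.ofNat := by
  unfold pvOcc pvParenPos
  congr 1
  rw [List.range_succ, List.filter_append]
  have hfalse : PySem.Chars.startswith ([] : List Char) [ch] = false := by
    rw [Bool.eq_false_iff]
    intro hq
    have h2 := (PySem.Chars.startswith_iff _ _).mp hq
    simp [List.prefix_nil] at h2
  have hlast : [s.length].filter (fun i => PySem.Chars.startswith (List.drop i s) [ch]) = [] := by
    simp [List.drop_length, hfalse]
  rw [hlast, List.append_nil]
  apply List.filter_congr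
  intro i hi
  have hi' : i < s.length := List.mem_range.mp hi
  have hhead : (List.drop i s).head? = some (s[i]'hi') := by
    rw [List.head?_drop]
    exact List.getElem?_eq_getElem hi'
  have hgetD : s.getD i ' ' = s[i]'hi' := by
    rw [List.getD_eq_getElem?_getD, List.getElem?_eq_getElem hi']
    rfl
  by_cases he : s[i]'hi' = ch
  · have h1 : PySem.Chars.startswith (List.drop i s) [ch] = true := by
      rw [PySem.Chars.startswith_iff, List.cons_prefix_iff]
      rcases hd : List.drop i s with _ | ⟨y, ys⟩
      · rw [hd] at hhead; simp at hhead
      · rw [hd] at hhead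
        simp only [List.head?_cons, Option.some.injEq] at hhead
        exact ⟨ys, by rw [hhead, he], List.nil_prefix⟩
    rw [h1, hgetD, he]
    simp
  · have h1 : PySem.Chars.startswith (List.drop i s) [ch] = false := by
      rw [Bool.eq_false_iff]
      intro hq
      obtain ⟨l', hl', -⟩ := List.cons_prefix_iff.mp ((PySem.Chars.startswith_iff _ _).mp hq)
      rw [hl'] at hhead
      simp only [List.head?_cons, Option.some.injEq] at hhead
      exact he hhead.symm
    rw [h1, hgetD]
    simp [he]

theorem pvSlice1_neg (c : List Char) :
    PySem.List.slice c (some 1) (some (-1)) = c.tail.dropLast := by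
  cases c with
  | nil => rfl
  | cons x xs =>
    simp only [PySem.List.slice, PySem.List.clampIdx_neg_one]
    have h1 : PySem.List.clampIdx (x :: xs).length 1 = 1 := by
      have e : (1 : Int) = ((1 : Nat) : Int) := by norm_num
      rw [e, PySem.List.clampIdx_natCast]; simp
    rw [h1]
    simp [List.dropLast_eq_take]

theorem pvSlice1_eq (c : List Char) (hne : c ≠ []) :
    PySem.List.slice c (some 1) (some ((c.length : Int) - 1)) = c.tail.dropLast := by
  have hl : 1 ≤ c.length := by cases c <;> simp_all
  have hb : ((c.length : Int) - 1) = ((c.length - 1 : Nat) : Int) := by omega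
  have h1 : (1 : Int) = ((1 : Nat) : Int) := by norm_num
  rw [hb, h1, PySem.List.slice_natCast]
  rw [List.dropLast_eq_take]
  rw [List.drop_one]
  congr 1
  simp

-- canonical sweep (proof-side characterisations of B's recursion and A's indexed loop)
def pvSegsC (c : List Char) (L : Int) (pr : Int) : List Int → List (List Char)
  | [] => []
  | p :: rest => PySem.List.slice c (some pr) (some p) :: pvSegsC c L (p + L) rest

def pvPrevC (L : Int) (pr : Int) : List Int → Int
  | [] => pr
  | p :: rest => pvPrevC L (p + L) rest

def pvChunk (c : List Char) (L : Int) (ops : List Int) (i : Nat) : List (List Char) :=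
  if i = 0 ∧ ops.length = 1 then
    [PySem.List.slice c (some 0) (some (ops.getD i 0))]
      ++ [PySem.List.slice c (some (ops.getD i 0 + L)) none]
  else if i = 0 then
    [PySem.List.slice c (some 0) (some (ops.getD i 0))]
  else if i = ops.length - 1 then
    [PySem.List.slice c (some (ops.getD (i - 1) 0 + L)) (some (ops.getD i 0))]
      ++ [PySem.List.slice c (some (ops.getD i 0 + L)) none]
  else
    [PySem.List.slice c (some (ops.getD (i - 1) 0 + L)) (some (ops.getD i 0))]

theorem pvFlatMap_singleton {A B : Type} (l : List A) (g : A → B) :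
    l.flatMap (fun i => [g i]) = l.map g := by
  induction l with
  | nil => rfl
  | cons a as ih => simp [ih]

theorem pvSegsC_zip (c : List Char) (L : Int) (rest : List Int) (p pr : Int) :
    pvSegsC c L pr (p :: rest) =
      PySem.List.slice c (some pr) (some p) ::
        ((p :: rest).zip rest).map (fun q => PySem.List.slice c (some (q.1 + L)) (some q.2)) := by
  induction rest generalizing p pr with
  | nil => simp [pvSegsC]
  | cons r rs ih =>
    rw [pvSegsC, ih r (p + L)]
    simp [List.zip_cons_cons]

theorem pvPrevC_getD (L : Int) (ops : List Int) (h : ops ≠ []) (pr : Int) :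
    pvPrevC L pr ops = ops.getD (ops.length - 1) 0 + L := by
  induction ops generalizing pr with
  | nil => simp at h
  | cons p rest ih =>
    cases rest with
    | nil => simp [pvPrevC]
    | cons r rs =>
      rw [pvPrevC, ih (by simp)]
      have e : (p :: r :: rs).length - 1 = (r :: rs).length - 1 + 1 := by simp
      rw [e, List.getD_cons_succ]

theorem pvMid_zip (c : List Char) (L : Int) (p : Int) (rest : List Int) :
    (List.range' 1 ((p :: rest).length - 1)).map
        (fun i => PySem.List.slice c (some ((p :: rest).getD (i - 1) 0 + L)) (some ((p :: rest).getD i 0))) =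
      ((p :: rest).zip rest).map (fun q => PySem.List.slice c (some (q.1 + L)) (some q.2)) := by
  apply List.ext_getElem
  · rw [List.length_map, List.length_map, List.length_range', List.length_zip]
    simp
  · intro j h1 h2
    rw [List.length_map, List.length_range'] at h1
    rw [List.getElem_map, List.getElem_map, List.getElem_range', List.getElem_zip]
    have hj1 : 1 + 1 * j - 1 = j := by omega
    have hj2 : 1 + 1 * j = j + 1 := by omega
    rw [hj1, hj2]
    have hb1 : j < (p :: rest).length := by simp at h1 ⊢; omega
    have hb2 : j + 1 < (p :: rest).length := by simp at h1 ⊢; omega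
    have e1 : (p :: rest).getD j 0 = (p :: rest)[j]'hb1 := by
      rw [List.getD_eq_getElem?_getD, List.getElem?_eq_getElem hb1]; rfl
    have e2 : (p :: rest).getD (j + 1) 0 = (p :: rest)[j + 1]'hb2 := by
      rw [List.getD_eq_getElem?_getD, List.getElem?_eq_getElem hb2]; rfl
    rw [e1, e2, List.getElem_cons_succ]

theorem pvFoldA (c : List Char) (L : Int) (ops : List Int) (h : ops ≠ []) :
    (List.range ops.length).foldl (fun acc i =>
      if i = 0 ∧ ops.length = 1 then
        acc ++ [PySem.List.slice c (some 0) (some (ops.getD i 0))]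
            ++ [PySem.List.slice c (some (ops.getD i 0 + L)) none]
      else if i = 0 then
        acc ++ [PySem.List.slice c (some 0) (some (ops.getD i 0))]
      else if i = ops.length - 1 then
        acc ++ [PySem.List.slice c (some (ops.getD (i - 1) 0 + L)) (some (ops.getD i 0))]
            ++ [PySem.List.slice c (some (ops.getD i 0 + L)) none]
      else
        acc ++ [PySem.List.slice c (some (ops.getD (i - 1) 0 + L)) (some (ops.getD i 0))]) [] =
    pvSegsC c L 0 ops ++ [PySem.List.slice c (some (pvPrevC L 0 ops)) none] := by
  have hstep : (fun (acc : List (List Char)) i =>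
      if i = 0 ∧ ops.length = 1 then
        acc ++ [PySem.List.slice c (some 0) (some (ops.getD i 0))]
            ++ [PySem.List.slice c (some (ops.getD i 0 + L)) none]
      else if i = 0 then
        acc ++ [PySem.List.slice c (some 0) (some (ops.getD i 0))]
      else if i = ops.length - 1 then
        acc ++ [PySem.List.slice c (some (ops.getD (i - 1) 0 + L)) (some (ops.getD i 0))]
            ++ [PySem.List.slice c (some (ops.getD i 0 + L)) none]
      else
        acc ++ [PySem.List.slice c (some (ops.getD (i - 1) 0 + L)) (some (ops.getD i 0))])
      = fun acc i => acc ++ pvChunk c L ops i := by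
    funext acc i
    unfold pvChunk
    split_ifs <;> simp only [List.append_assoc]
  rw [hstep, PySem.List.foldl_append_eq_flatMap, List.nil_append]
  by_cases hk2 : ops.length = 1
  · obtain ⟨a, rfl⟩ : ∃ a, ops = [a] := by
      cases ops with
      | nil => simp at hk2
      | cons a as =>
        cases as with
        | nil => exact ⟨a, rfl⟩
        | cons b bs => simp at hk2
    simp [pvChunk, pvSegsC, pvPrevC, List.range_one]
  · have hk1 : 0 < ops.length := List.length_pos_of_ne_nil h
    have hk3 : 2 ≤ ops.length := by omega
    have hr0 : List.range ops.length = 0 :: List.range' 1 (ops.length - 1) := by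
      rw [List.range_eq_range']
      cases hkk : ops.length with
      | zero => omega
      | succ n => simp [List.range'_succ]
    rw [hr0, List.flatMap_cons]
    have hc0 : pvChunk c L ops 0 = [PySem.List.slice c (some 0) (some (ops.getD 0 0))] := by
      unfold pvChunk
      rw [if_neg (by rintro ⟨-, hb⟩; omega), if_pos rfl]
    rw [hc0]
    have hr1 : List.range' 1 (ops.length - 1) = List.range' 1 (ops.length - 2) ++ [ops.length - 1] := by
      have e : ops.length - 1 = (ops.length - 2) + 1 := by omega
      rw [e, List.range'_concat]
      have e2 : 1 + 1 * (ops.length - 2) = ops.length - 2 + 1 := by omega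
      rw [e2, ← e]
    rw [hr1, List.flatMap_append]
    have hmid : (List.range' 1 (ops.length - 2)).flatMap (pvChunk c L ops) =
        (List.range' 1 (ops.length - 2)).map (fun i =>
          PySem.List.slice c (some (ops.getD (i - 1) 0 + L)) (some (ops.getD i 0))) := by
      rw [List.flatMap_def]
      have hm : (List.range' 1 (ops.length - 2)).map (pvChunk c L ops) =
          (List.range' 1 (ops.length - 2)).map (fun i =>
            [PySem.List.slice c (some (ops.getD (i - 1) 0 + L)) (some (ops.getD i 0))]) := by
        apply List.map_congr_left
        intro i hi
        obtain ⟨hi1, hi2⟩ := List.mem_range'_1.mp hi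
        unfold pvChunk
        rw [if_neg (by rintro ⟨hb, -⟩; omega), if_neg (by omega), if_neg (by omega)]
      rw [hm, ← List.flatMap_def, pvFlatMap_singleton]
    rw [hmid]
    simp only [List.flatMap_cons, List.flatMap_nil, List.append_nil]
    have hclast : pvChunk c L ops (ops.length - 1) =
        [PySem.List.slice c (some (ops.getD (ops.length - 1 - 1) 0 + L)) (some (ops.getD (ops.length - 1) 0))]
          ++ [PySem.List.slice c (some (ops.getD (ops.length - 1) 0 + L)) none] := by
      unfold pvChunk
      rw [if_neg (by rintro ⟨hb, -⟩; omega), if_neg (by omega), if_pos rfl]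
    rw [hclast]
    obtain ⟨p, rest, rfl⟩ : ∃ p rest, ops = p :: rest := by
      cases ops with
      | nil => simp at h
      | cons p rest => exact ⟨p, rest, rfl⟩
    rw [pvSegsC_zip, pvPrevC_getD L _ (by simp) 0, ← pvMid_zip c L p rest, hr1, List.map_append]
    simp

-- B's recursive splitter produces exactly the canonical sweep over the remaining occurrence positions
theorem pvSegsB_eq (c f : List Char) (pr : Int) (p : Nat) :
    segsB c f pr p =
      pvSegsC c (f.length : Int) pr
          (((List.range' p (c.length + 1 - p)).filter
            (fun i => PySem.Chars.startswith (List.drop i c) f)).map Int.ofNat) ++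
        [PySem.List.slice c
          (some (pvPrevC (f.length : Int) pr
            (((List.range' p (c.length + 1 - p)).filter
              (fun i => PySem.Chars.startswith (List.drop i c) f)).map Int.ofNat))) none] := by
  have key : ∀ m : Nat, ∀ p pr, c.length + 1 - p ≤ m →
      segsB c f pr p =
        pvSegsC c (f.length : Int) pr
            (((List.range' p (c.length + 1 - p)).filter
              (fun i => PySem.Chars.startswith (List.drop i c) f)).map Int.ofNat) ++
          [PySem.List.slice c
            (some (pvPrevC (f.length : Int) pr
              (((List.range' p (c.length + 1 - p)).filter
                (fun i => PySem.Chars.startswith (List.drop i c) f)).map Int.ofNat))) none] := by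
    intro m
    induction m with
    | zero =>
      intro p pr hm
      have hp : c.length < p := by omega
      rw [segsB]
      rw [dif_neg (by simp [pvFindFrom_of_gt c f p hp])]
      have h0 : c.length + 1 - p = 0 := by omega
      rw [h0]
      simp [List.range', pvSegsC, pvPrevC]
    | succ m ih =>
      intro p pr hm
      rw [segsB]
      by_cases hc : PySem.Chars.findFrom c f (p : Int) none = -1
      · rw [dif_neg (by simpa using hc)]
        rw [pvFilter_empty c f p hc]
        simp [pvSegsC, pvPrevC]
      · rw [dif_pos (by simpa using hc)]
        obtain ⟨hpr, hrle⟩ := pvFindFrom_ret_bounds c f p hc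
        have hrec : c.length + 1 - ((PySem.Chars.findFrom c f (p : Int) none).toNat + 1) ≤ m := by
          omega
        rw [ih _ _ hrec]
        rw [pvFilter_step c f p hc, List.map_cons]
        have hp : p ≤ c.length := le_trans hpr hrle
        have hr0 : (0 : Int) ≤ PySem.Chars.findFrom c f (p : Int) none :=
          le_trans (Int.natCast_nonneg p) (PySem.Chars.findFrom_natCast_spec c f p hp hc).1
        have hrval : Int.ofNat (PySem.Chars.findFrom c f (p : Int) none).toNat =
            PySem.Chars.findFrom c f (p : Int) none := Int.toNat_of_nonneg hr0
        rw [hrval, pvSegsC, pvPrevC]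
        simp
  exact key (c.length + 1 - p) p pr le_rfl

-- ===== the balance-counter sweep agrees with A's position-pair check =====

theorem pvParenPos_cons (ch c : Char) (s : List Char) :
    pvParenPos ch (c :: s) = (if c = ch then [0] else []) ++ (pvParenPos ch s).map (· + 1) := by
  unfold pvParenPos
  rw [List.length_cons, List.range_succ_eq_map, List.filter_cons, List.filter_map]
  have hcomp : ((fun i => (c :: s).getD i ' ' == ch) ∘ Nat.succ) = fun i => s.getD i ' ' == ch := by
    funext i
    simp [List.getD_cons_succ]
  rw [hcomp]
  have hsucc : (List.map Nat.succ ((List.range s.length).filter (fun i => s.getD i ' ' == ch))) =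
      ((List.range s.length).filter (fun i => s.getD i ' ' == ch)).map (· + 1) := by
    simp [Nat.succ_eq_add_one]
  by_cases hc : c = ch
  · simp [hc, hsucc]
  · simp [hc, hsucc]

theorem pvCount_take (ch : Char) (s : List Char) (t : Nat) :
    (List.take t s).count ch = ((pvParenPos ch s).filter (fun x => decide (x < t))).length := by
  induction s generalizing t with
  | nil => simp [pvParenPos]
  | cons c s ih =>
    cases t with
    | zero => simp
    | succ u =>
      rw [List.take_succ_cons, List.count_cons, pvParenPos_cons, List.filter_append,
        List.length_append, List.filter_map]
      have hcomp : ((fun x => decide (x < u + 1)) ∘ (· + 1)) = fun x => decide (x < u) := by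
        funext x
        simp
      rw [hcomp, List.length_map, ← ih]
      by_cases hc : c = ch
      · simp [hc]
        omega
      · have hcc : (c == ch) = false := by simp [hc]
        simp [hc, hcc]

theorem pvParenPos_sorted (ch : Char) (s : List Char) :
    (pvParenPos ch s).Pairwise (· < ·) := by
  unfold pvParenPos
  exact (List.pairwise_lt_range).filter _

theorem pvParenPos_mem (ch : Char) (s : List Char) (x : Nat) (hx : x ∈ pvParenPos ch s) :
    x < s.length ∧ s.getD x ' ' = ch := by
  unfold pvParenPos at hx
  obtain ⟨h1, h2⟩ := List.mem_filter.mp hx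
  exact ⟨List.mem_range.mp h1, by simpa using h2⟩

theorem pvSortedFilter_iff (L : List Nat) (hL : L.Pairwise (· < ·)) (t j : Nat) :
    j + 1 ≤ (L.filter (fun x => decide (x < t))).length ↔ ∃ h : j < L.length, L[j] < t := by
  induction L generalizing j with
  | nil => simp
  | cons a L ih =>
    obtain ⟨ha, hL'⟩ := List.pairwise_cons.mp hL
    rw [List.filter_cons]
    by_cases hat : a < t
    · rw [if_pos (by simpa using hat)]
      cases j with
      | zero => simp [hat]
      | succ j =>
        rw [List.length_cons]
        have : j + 1 + 1 ≤ ((L.filter (fun x => decide (x < t))).length + 1) ↔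
            j + 1 ≤ (L.filter (fun x => decide (x < t))).length := by omega
        rw [this, ih hL']
        constructor
        · rintro ⟨h, hlt⟩
          refine ⟨by simpa using Nat.succ_lt_succ h, ?_⟩
          rw [List.getElem_cons_succ]
          exact hlt
        · rintro ⟨h, hlt⟩
          rw [List.getElem_cons_succ] at hlt
          have hj : j < L.length := by
            have := h
            simp only [List.length_cons] at this
            omega
          exact ⟨hj, hlt⟩
    · rw [if_neg (by simpa using hat)]
      have hnil : L.filter (fun x => decide (x < t)) = [] := by
        rw [List.filter_eq_nil_iff]
        intro x hx
        have := ha x hx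
        simp
        omega
      rw [hnil]
      constructor
      · intro h
        simp at h
      · rintro ⟨h, hlt⟩
        exfalso
        cases j with
        | zero => simp at hlt; omega
        | succ j =>
          simp only [List.length_cons] at h
          have hj : j < L.length := by omega
          rw [List.getElem_cons_succ] at hlt
          have := ha (L[j]'hj) (List.getElem_mem hj)
          omega

theorem pvBalB_iff (s : List Char) (k : Int) (hk : 0 ≤ k) :
    balB k s = true ↔ ∀ t ≤ s.length,
      ((List.take t s).count ')' : Int) ≤ k + ((List.take t s).count '(' : Int) := by
  induction s generalizing k with
  | nil =>
    constructor
    · intro _ t _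
      simp only [List.take_nil, List.count_nil]
      push_cast
      omega
    · intro _
      simp [balB]
  | cons c s ih =>
    have hsplit : (∀ t ≤ (c :: s).length,
          ((List.take t (c :: s)).count ')' : Int) ≤ k + ((List.take t (c :: s)).count '(' : Int)) ↔
        (∀ u ≤ s.length,
          ((c :: List.take u s).count ')' : Int) ≤ k + ((c :: List.take u s).count '(' : Int)) := by
      constructor
      · intro H u hu
        have := H (u + 1) (by simpa using Nat.succ_le_succ hu)
        rwa [List.take_succ_cons] at this
      · intro H t ht
        cases t with
        | zero =>
          simp only [List.take_zero, List.count_nil]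
          push_cast
          omega
        | succ u =>
          have := H u (by simpa using ht)
          rwa [List.take_succ_cons]
    rw [hsplit]
    by_cases hc1 : c = '('
    · rw [show balB k (c :: s) = balB (k + 1) s by simp [balB, hc1]]
      rw [ih (k + 1) (by omega)]
      refine forall_congr' fun u => forall_congr' fun hu => ?_
      have e1 : ((c :: List.take u s).count ')') = (List.take u s).count ')' := by
        simp [List.count_cons, hc1]
      have e2 : ((c :: List.take u s).count '(') = (List.take u s).count '(' + 1 := by
        simp [List.count_cons, hc1]
      rw [e1, e2]
      push_cast
      constructor <;> intro <;> omega
    · by_cases hc2 : c = ')'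
      · by_cases hk0 : k - 1 < 0
        · rw [show balB k (c :: s) = false by simp [balB, hc1, hc2, hk0]]
          constructor
          · intro h
            simp at h
          · intro H
            exfalso
            have := H 0 (Nat.zero_le _)
            simp only [List.take_zero] at this
            have e1 : ((c :: ([] : List Char)).count ')') = 1 := by simp [List.count_cons, hc2]
            have e2 : ((c :: ([] : List Char)).count '(') = 0 := by
              simp [List.count_cons, hc1]
            rw [e1, e2] at this
            push_cast at this
            omega
        · rw [show balB k (c :: s) = balB (k - 1) s by simp [balB, hc1, hc2, hk0]]
          rw [ih (k - 1) (by omega)]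
          refine forall_congr' fun u => forall_congr' fun hu => ?_
          have e1 : ((c :: List.take u s).count ')') = (List.take u s).count ')' + 1 := by
            simp [List.count_cons, hc2]
          have e2 : ((c :: List.take u s).count '(') = (List.take u s).count '(' := by
            simp [List.count_cons, hc1]
          rw [e1, e2]
          push_cast
          constructor <;> intro <;> omega
      · rw [show balB k (c :: s) = balB k s by simp [balB, hc1, hc2]]
        rw [ih k hk]
        refine forall_congr' fun u => forall_congr' fun hu => ?_
        have e1 : ((c :: List.take u s).count ')') = (List.take u s).count ')' := by
          simp [List.count_cons, hc2]
        have e2 : ((c :: List.take u s).count '(') = (List.take u s).count '(' := by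
          simp [List.count_cons, hc1]
        rw [e1, e2]

theorem pvFB_ne (s : List Char) (j : Nat) (hjF : j < (pvParenPos '(' s).length)
    (hjB : j < (pvParenPos ')' s).length) :
    (pvParenPos '(' s)[j] ≠ (pvParenPos ')' s)[j] := by
  intro he
  have hF := pvParenPos_mem '(' s _ (List.getElem_mem hjF)
  have hB := pvParenPos_mem ')' s _ (List.getElem_mem hjB)
  rw [he] at hF
  exact absurd (hF.2.symm.trans hB.2) (by decide)

theorem pvBal_iff_C (s : List Char) :
    balB 0 s = true ↔ ∀ j, ∀ hj : j < (pvParenPos ')' s).length,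
      ∃ h2 : j < (pvParenPos '(' s).length, (pvParenPos '(' s)[j] < (pvParenPos ')' s)[j] := by
  rw [pvBalB_iff s 0 le_rfl]
  constructor
  · intro H j hj
    have hBj := pvParenPos_mem ')' s _ (List.getElem_mem hj)
    have hcnt := H ((pvParenPos ')' s)[j] + 1) hBj.1
    rw [pvCount_take, pvCount_take] at hcnt
    have h1 : j + 1 ≤ ((pvParenPos ')' s).filter
        (fun x => decide (x < (pvParenPos ')' s)[j] + 1))).length :=
      (pvSortedFilter_iff _ (pvParenPos_sorted ')' s) _ j).mpr ⟨hj, by omega⟩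
    have h2 : j + 1 ≤ ((pvParenPos '(' s).filter
        (fun x => decide (x < (pvParenPos ')' s)[j] + 1))).length := by omega
    obtain ⟨hjF, hlt⟩ := (pvSortedFilter_iff _ (pvParenPos_sorted '(' s) _ j).mp h2
    refine ⟨hjF, ?_⟩
    have hne := pvFB_ne s j hjF hj
    omega
  · intro C t _
    rw [pvCount_take, pvCount_take]
    by_cases hm : ((pvParenPos ')' s).filter (fun x => decide (x < t))).length = 0
    · rw [hm]
      push_cast
      have := ((pvParenPos '(' s).filter (fun x => decide (x < t))).length
      omega
    · set m := ((pvParenPos ')' s).filter (fun x => decide (x < t))).length with hmdef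
      obtain ⟨hjB, hBlt⟩ := (pvSortedFilter_iff _ (pvParenPos_sorted ')' s) t (m - 1)).mp (by omega)
      obtain ⟨hjF, hFB⟩ := C (m - 1) hjB
      have h2 : (m - 1) + 1 ≤ ((pvParenPos '(' s).filter (fun x => decide (x < t))).length :=
        (pvSortedFilter_iff _ (pvParenPos_sorted '(' s) t (m - 1)).mpr ⟨hjF, by omega⟩
      omega

theorem pvAcond_iff (s : List Char)
    (hpre : ¬ ((pvParenPos '(' s).length < (pvParenPos ')' s).length ∧
      ∀ q < (pvParenPos '(' s).length,
        (pvParenPos '(' s).getD q 0 ≤ (pvParenPos ')' s).getD q 0)) :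
    (List.range (pvParenPos ')' s).length).all (fun pos =>
        ! decide (Int.ofNat ((pvParenPos '(' s).getD pos 0) > Int.ofNat ((pvParenPos ')' s).getD pos 0))) =
      balB 0 s := by
  rw [Bool.eq_iff_iff, List.all_eq_true, pvBal_iff_C]
  constructor
  · intro H j hj
    have hjF : j < (pvParenPos '(' s).length := by
      by_contra hnjF
      apply hpre
      refine ⟨by omega, fun q hq => ?_⟩
      have hq2 : q < (pvParenPos ')' s).length := by omega
      have hQ := H q (List.mem_range.mpr hq2)
      simp only [Bool.not_eq_eq_eq_not, Bool.not_true, decide_eq_false_iff_not, not_lt] at hQ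
      simp only [Int.ofNat_eq_natCast] at hQ
      exact_mod_cast hQ
    have hJ := H j (List.mem_range.mpr hj)
    simp only [Bool.not_eq_eq_eq_not, Bool.not_true, decide_eq_false_iff_not, not_lt] at hJ
    have e1 : (pvParenPos '(' s).getD j 0 = (pvParenPos '(' s)[j] := by
      rw [List.getD_eq_getElem?_getD, List.getElem?_eq_getElem hjF]; rfl
    have e2 : (pvParenPos ')' s).getD j 0 = (pvParenPos ')' s)[j] := by
      rw [List.getD_eq_getElem?_getD, List.getElem?_eq_getElem hj]; rfl
    rw [e1, e2] at hJ
    have hne := pvFB_ne s j hjF hj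
    refine ⟨hjF, ?_⟩
    have hJ' : (pvParenPos '(' s)[j] ≤ (pvParenPos ')' s)[j] := by
      simp only [Int.ofNat_eq_natCast] at hJ
      exact_mod_cast hJ
    omega
  · intro C pos hpos
    have hj := List.mem_range.mp hpos
    obtain ⟨hjF, hlt⟩ := C pos hj
    have e1 : (pvParenPos '(' s).getD pos 0 = (pvParenPos '(' s)[pos] := by
      rw [List.getD_eq_getElem?_getD, List.getElem?_eq_getElem hjF]; rfl
    have e2 : (pvParenPos ')' s).getD pos 0 = (pvParenPos ')' s)[pos] := by
      rw [List.getD_eq_getElem?_getD, List.getElem?_eq_getElem hj]; rfl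
    simp only [Bool.not_eq_eq_eq_not, Bool.not_true, decide_eq_false_iff_not, not_lt, e1, e2]
    simp only [Int.ofNat_eq_natCast]
    exact_mod_cast Nat.le_of_lt hlt

theorem pvIsOuter_eq (c : List Char) (hne : c ≠ [])
    (hpre : ¬ (c.head? = some '(' ∧ c.getLast? = some ')' ∧
      (pvParenPos '(' c.tail.dropLast).length < (pvParenPos ')' c.tail.dropLast).length ∧
      ∀ q < (pvParenPos '(' c.tail.dropLast).length,
        (pvParenPos '(' c.tail.dropLast).getD q 0 ≤ (pvParenPos ')' c.tail.dropLast).getD q 0)) :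
    isOuterA c = isOuterB c := by
  obtain ⟨x, xs, rfl⟩ : ∃ x xs, c = x :: xs := by
    cases c with
    | nil => exact absurd rfl hne
    | cons a as => exact ⟨a, as, rfl⟩
  have hg0 : PySem.List.pyGetD (x :: xs) 0 ' ' = x := by
    have e : (0 : Int) = ((0 : Nat) : Int) := by norm_num
    rw [e, PySem.List.pyGetD_natCast]; rfl
  have hlast_lt : (x :: xs).length - 1 < (x :: xs).length := by simp
  have hglast : PySem.List.pyGetD (x :: xs) (((x :: xs).length : Int) - 1) ' '
      = (x :: xs).getLast (by simp) := by
    have e : (((x :: xs).length : Int) - 1) = (((x :: xs).length - 1 : Nat) : Int) := by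
      push_cast [List.length_cons]; omega
    rw [e, PySem.List.pyGetD_natCast, List.getD_eq_getElem?_getD,
        List.getElem?_eq_getElem hlast_lt, List.getLast_eq_getElem]
    rfl
  have hbg1 : PySem.List.slice (x :: xs) none (some 1) = [x] := by
    rw [PySem.List.slice_to _ (by norm_num)]
    rfl
  have hbg2 : PySem.List.slice (x :: xs) (some (-1)) none = [(x :: xs).getLast (by simp)] := by
    rw [PySem.List.slice_from_neg_one]
    exact List.drop_length_sub_one (by simp)
  simp only [isOuterA, isOuterB]
  rw [hg0, hglast, hbg1, hbg2]
  have hguard : (([x] == ['(']) && (([(x :: xs).getLast (by simp)] : List Char) == [')']))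
      = ((x == '(') && ((x :: xs).getLast (by simp) == ')')) := by
    by_cases hx : x = '(' <;> by_cases hy : (x :: xs).getLast (by simp) = ')' <;> simp [hx, hy]
  rw [hguard]
  by_cases hcond : ((x == '(') && ((x :: xs).getLast (by simp) == ')')) = true
  · rw [if_pos hcond, if_pos hcond]
    rw [pvSlice1_eq _ (by simp), pvSlice1_neg]
    rw [pvFindPosi_eq, pvFindPosi_eq, pvOcc_single, pvOcc_single]
    have hx : x = '(' ∧ (x :: xs).getLast (by simp) = ')' := by simpa using hcond
    have hpre' : ¬ ((pvParenPos '(' (x :: xs).tail.dropLast).length <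
          (pvParenPos ')' (x :: xs).tail.dropLast).length ∧
        ∀ q < (pvParenPos '(' (x :: xs).tail.dropLast).length,
          (pvParenPos '(' (x :: xs).tail.dropLast).getD q 0 ≤
            (pvParenPos ')' (x :: xs).tail.dropLast).getD q 0) := by
      intro hq
      apply hpre
      refine ⟨?_, ?_, hq.1, hq.2⟩
      · simp [hx.1]
      · rw [List.getLast?_eq_some_getLast (by simp), hx.2]
    have hA : (List.range ((pvParenPos ')' (x :: xs).tail.dropLast).map Int.ofNat).length).all
        (fun pos => ! decide (PySem.List.pyGetD ((pvParenPos '(' (x :: xs).tail.dropLast).map Int.ofNat) (pos : Int) 0 >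
            PySem.List.pyGetD ((pvParenPos ')' (x :: xs).tail.dropLast).map Int.ofNat) (pos : Int) 0))
        = (List.range (pvParenPos ')' (x :: xs).tail.dropLast).length).all
          (fun pos => ! decide (Int.ofNat ((pvParenPos '(' (x :: xs).tail.dropLast).getD pos 0) >
            Int.ofNat ((pvParenPos ')' (x :: xs).tail.dropLast).getD pos 0))) := by
      rw [List.length_map]
      have hpt : (fun (pos : Nat) => ! decide (PySem.List.pyGetD ((pvParenPos '(' (x :: xs).tail.dropLast).map Int.ofNat) (pos : Int) 0 >
            PySem.List.pyGetD ((pvParenPos ')' (x :: xs).tail.dropLast).map Int.ofNat) (pos : Int) 0))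
          = (fun (pos : Nat) => ! decide (Int.ofNat ((pvParenPos '(' (x :: xs).tail.dropLast).getD pos 0) >
            Int.ofNat ((pvParenPos ')' (x :: xs).tail.dropLast).getD pos 0))) := by
        funext pos
        have m1 : PySem.List.pyGetD ((pvParenPos '(' (x :: xs).tail.dropLast).map Int.ofNat) (pos : Int) 0
            = Int.ofNat ((pvParenPos '(' (x :: xs).tail.dropLast).getD pos 0) := by
          rw [PySem.List.pyGetD_natCast]
          have := List.getD_map (pvParenPos '(' (x :: xs).tail.dropLast) 0 (n := pos) Int.ofNat
          simpa using this
        have m2 : PySem.List.pyGetD ((pvParenPos ')' (x :: xs).tail.dropLast).map Int.ofNat) (pos : Int) 0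
            = Int.ofNat ((pvParenPos ')' (x :: xs).tail.dropLast).getD pos 0) := by
          rw [PySem.List.pyGetD_natCast]
          have := List.getD_map (pvParenPos ')' (x :: xs).tail.dropLast) 0 (n := pos) Int.ofNat
          simpa using this
        rw [m1, m2]
      rw [hpt]
    rw [hA]
    exact pvAcond_iff _ hpre'
  · rw [if_neg hcond, if_neg hcond]

-- ===== VERDICT (by name: the statement is the Claim_ definition above) =====
theorem findConstrain_spec : Claim_equal_findConstrain := by
  unfold Claim_equal_findConstrain
  intro allStr operation _ hpre
  unfold Spec_findConstrain
  obtain ⟨hne, hcrash⟩ := hpre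
  simp only [findConstrain, findConstrain_alt]
  rw [pvIsOuter_eq allStr.toList hne hcrash]
  rw [pvSlice1_eq _ hne, pvSlice1_neg]
  rw [pvFindPosi_eq]
  set c := if isOuterB allStr.toList then allStr.toList.tail.dropLast else allStr.toList with hc
  have h00 : ((0 : Nat) : Int) = (0 : Int) := by norm_num
  by_cases hfind : PySem.Chars.find c operation.toList = -1
  · rw [if_pos hfind]
    have h0 : PySem.Chars.findFrom c operation.toList ((0 : Nat) : Int) none = -1 := by
      rw [h00, PySem.Chars.findFrom_zero]
      exact hfind
    have he := pvFilter_empty c operation.toList 0 h0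
    simp only [Nat.sub_zero] at he
    have hops : pvOcc c operation.toList = [] := by
      unfold pvOcc
      rw [List.range_eq_range', he]
      rfl
    rw [hops]
    simp
  · rw [if_neg hfind]
    have h0 : PySem.Chars.findFrom c operation.toList ((0 : Nat) : Int) none ≠ -1 := by
      rw [h00, PySem.Chars.findFrom_zero]
      exact hfind
    have hstep := pvFilter_step c operation.toList 0 h0
    simp only [Nat.sub_zero] at hstep
    have hopsne : pvOcc c operation.toList ≠ [] := by
      unfold pvOcc
      rw [List.range_eq_range', hstep]
      simp
    rw [pvFoldA c ((operation.toList.length : Int)) (pvOcc c operation.toList) hopsne]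
    rw [pvSegsB_eq c operation.toList 0 0]
    have hr : ((List.range' 0 (c.length + 1 - 0)).filter
          (fun i => PySem.Chars.startswith (List.drop i c) operation.toList)).map Int.ofNat
        = pvOcc c operation.toList := by
      unfold pvOcc
      rw [List.range_eq_range', Nat.sub_zero]
    rw [hr]
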